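-- pv_equiv track=rewrite | github.com/BrickEater/curses | grid.py | define_window_key_points
-- ===== SOURCE A (Python) =====
-- from typing import Optional, Dict, List, Tuple
--
-- def define_window_key_points(window_layout: List[List[int]]) -> Dict[int, Tuple]:
--     """
--     Find the top-left and bottom-right corners for each unique window ID in the layout.
--
--     Args:
--         window_layout (List[List[int]]): A 2D array where each integer represents a window ID.
--
--     Returns:
--         Dict[int, Tuple]: A dictionary where the keys are window IDs, and the values are tuples
--                           containing the coordinates of the top-left and bottom-right corners of
--                           the window's area.
--     """
--     # The top left and bottom right corners of the window layout is needed
--     # to then calculate the dimentions with define_window_length_and_width()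
--     #
--     # It should be noted that the +1s are needed because the top left corner
--     # is what's used to refrense a terminal cell. Without these, the bottom
--     # and right sides will not be drawn correctly.
--     window_diagonal_corners = {}
--     for y in range(len(window_layout)):
--         for x in range(len(window_layout[y])):
--             value = window_layout[y][x]
--             if value not in window_diagonal_corners:
--                 window_diagonal_corners[value] = [(y, x), (y + 1, x + 1)]
--             else:
--                 window_diagonal_corners[value][1] = (y + 1, x + 1)
--     return window_diagonal_corners
-- ===== SOURCE B (Python) =====
-- def define_window_key_points(window_layout):
--     # Flatten the grid to (y, x, id) cells in reading order, then make two
--     # write-once passes: a forward pass records each id's first cell (the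
--     # top-left corner), and a backward pass over the reversed cell list
--     # records each id's last cell shifted by +1 (the bottom-right corner).
--     cells = [(y, x, v) for y, row in enumerate(window_layout)
--                        for x, v in enumerate(row)]
--     first = {}
--     for y, x, v in cells:
--         if v not in first:
--             first[v] = (y, x)
--     last = {}
--     for y, x, v in reversed(cells):
--         if v not in last:
--             last[v] = (y + 1, x + 1)
--     return {v: [p, last[v]] for v, p in first.items()}
-- ===== Notes on version B (the rewrite author's own statement) =====
-- stated objective: alternative
-- what changed: A makes one row-major pass mutating a two-element corner list per id; B flattens the grid to a cell list and makes two write-once passes in opposite directions: a forward pass records each id's first cell (top-left) and a backward pass over the reversed list records each id's last cell +1 (bottom-right), then zips the two dicts.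
import Mathlib
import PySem

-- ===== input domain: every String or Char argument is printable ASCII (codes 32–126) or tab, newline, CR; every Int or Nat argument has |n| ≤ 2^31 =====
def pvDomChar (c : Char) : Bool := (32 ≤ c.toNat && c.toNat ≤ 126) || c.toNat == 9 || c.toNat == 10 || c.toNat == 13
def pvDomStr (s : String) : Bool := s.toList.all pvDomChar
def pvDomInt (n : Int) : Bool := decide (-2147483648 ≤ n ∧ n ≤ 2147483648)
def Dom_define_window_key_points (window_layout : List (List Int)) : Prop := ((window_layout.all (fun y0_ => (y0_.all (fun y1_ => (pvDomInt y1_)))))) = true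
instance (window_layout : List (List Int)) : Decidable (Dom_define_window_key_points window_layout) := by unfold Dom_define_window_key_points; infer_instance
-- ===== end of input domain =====

-- B replaces A's in-loop mutation of the corner pair by two write-once passes over the
-- flattened cell list in opposite directions (first occurrence forward, last occurrence
-- backward), then zips the two dicts (objective: alternative).

-- ===== PORT A =====
-- for y in range(len(window_layout)): for x in range(len(window_layout[y])): …
-- indexing is always in range here, so pyGetD is exact; the list assignment
-- window_diagonal_corners[value][1] = (y+1, x+1) is Dict.modify with pySetD (key present,
-- list has length 2, so both are exact where reached).
def define_window_key_points (window_layout : List (List Int)) : List (Int × List (Int × Int)) :=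
  ((PySem.List.pyRange 0 window_layout.length 1).foldl (fun d y =>
      (PySem.List.pyRange 0 (PySem.List.pyGetD window_layout y []).length 1).foldl (fun d x =>
        let value := PySem.List.pyGetD (PySem.List.pyGetD window_layout y []) x 0
        if d.contains value = false then
          d.insert value [(y, x), (y + 1, x + 1)]
        else
          d.modify value [] (fun l => PySem.List.pySetD l 1 (y + 1, x + 1))) d)
    PySem.Dict.empty).items

-- ===== PORT B =====
-- cells comprehension → flatMap over enumerate; the two insert-if-absent loops are folds;
-- last[v] in the comprehension is getD (the key is always present, so getD is exact).
def define_window_key_points_alt (window_layout : List (List Int)) : List (Int × List (Int × Int)) :=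
  let cells := (PySem.List.enumerate window_layout 0).flatMap (fun yr =>
    (PySem.List.enumerate yr.2 0).map (fun xv => (yr.1, xv.1, xv.2)))
  let first := cells.foldl (fun d c =>
    if d.contains c.2.2 then d else d.insert c.2.2 (c.1, c.2.1)) PySem.Dict.empty
  let last := cells.reverse.foldl (fun d c =>
    if d.contains c.2.2 then d else d.insert c.2.2 (c.1 + 1, c.2.1 + 1)) PySem.Dict.empty
  first.items.map (fun p => (p.1, [p.2, last.getD p.1 (0, 0)]))

-- ===== PRECONDITION & SPEC =====
def Spec_define_window_key_points (window_layout : List (List Int)) (out : List (Int × List (Int × Int))) : Prop := out = define_window_key_points_alt window_layout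
instance (window_layout : List (List Int)) (out : List (Int × List (Int × Int))) : Decidable (Spec_define_window_key_points window_layout out) := by unfold Spec_define_window_key_points; infer_instance

-- ===== CLAIM (what is proved, stated in full; the proofs are below) =====
def Claim_equal_define_window_key_points : Prop := ∀ (window_layout : List (List Int)), Dom_define_window_key_points window_layout → Spec_define_window_key_points window_layout (define_window_key_points window_layout)

-- ===== LEMMAS AND PROOFS =====

-- the flattened cell list (y, x, value) in reading order
def pvCells (w : List (List Int)) : List (Int × Int × Int) :=
  (PySem.List.enumerate w 0).flatMap (fun yr =>
    (PySem.List.enumerate yr.2 0).map (fun xv => (yr.1, xv.1, xv.2)))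

-- A's loop body per cell
def pvStepA (d : PySem.Dict Int (List (Int × Int))) (c : Int × Int × Int) : PySem.Dict Int (List (Int × Int)) :=
  if d.contains c.2.2 = false then
    d.insert c.2.2 [(c.1, c.2.1), (c.1 + 1, c.2.1 + 1)]
  else
    d.modify c.2.2 [] (fun l => PySem.List.pySetD l 1 (c.1 + 1, c.2.1 + 1))

-- B's insert-if-absent loop body, parametrised by the stored value
def pvStepIns (val : Int × Int × Int → Int × Int) (d : PySem.Dict Int (Int × Int)) (c : Int × Int × Int) : PySem.Dict Int (Int × Int) :=
  if d.contains c.2.2 then d else d.insert c.2.2 (val c)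

def pvPos (c : Int × Int × Int) : Int × Int := (c.1, c.2.1)
def pvBump (c : Int × Int × Int) : Int × Int := (c.1 + 1, c.2.1 + 1)

-- B's two write-once dicts over an arbitrary cell list
def pvFirst (l : List (Int × Int × Int)) : PySem.Dict Int (Int × Int) :=
  l.foldl (pvStepIns pvPos) PySem.Dict.empty
def pvLast (l : List (Int × Int × Int)) : PySem.Dict Int (Int × Int) :=
  l.reverse.foldl (pvStepIns pvBump) PySem.Dict.empty

lemma pv_nested_eq_cells (step : PySem.Dict Int (List (Int × Int)) → (Int × Int × Int) → PySem.Dict Int (List (Int × Int)))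
    (l : List (Int × List Int)) (init : PySem.Dict Int (List (Int × Int))) :
    l.foldl (fun d yr => (PySem.List.enumerate yr.2 0).foldl (fun d xv => step d (yr.1, xv.1, xv.2)) d) init
      = (l.flatMap (fun yr => (PySem.List.enumerate yr.2 0).map (fun xv => (yr.1, xv.1, xv.2)))).foldl step init := by
  induction l generalizing init with
  | nil => rfl
  | cons hd tl ih =>
      simp only [List.foldl_cons, List.flatMap_cons, List.foldl_append, List.foldl_map]
      exact ih _

lemma pv_pyRange_fold (xs : List Int) (F : PySem.Dict Int (List (Int × Int)) → Int → Int → PySem.Dict Int (List (Int × Int)))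
    (init : PySem.Dict Int (List (Int × Int))) :
    (PySem.List.pyRange 0 xs.length 1).foldl (fun d j => F d j (PySem.List.pyGetD xs j 0)) init
      = (PySem.List.enumerate xs 0).foldl (fun d p => F d p.1 p.2) init := by
  rw [PySem.List.enumerate_eq_map_pyRange xs 0, List.foldl_map]
  rfl

lemma pv_pyRange_fold_rows (w : List (List Int)) (F : PySem.Dict Int (List (Int × Int)) → Int → List Int → PySem.Dict Int (List (Int × Int)))
    (init : PySem.Dict Int (List (Int × Int))) :
    (PySem.List.pyRange 0 w.length 1).foldl (fun d j => F d j (PySem.List.pyGetD w j [])) init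
      = (PySem.List.enumerate w 0).foldl (fun d p => F d p.1 p.2) init := by
  rw [PySem.List.enumerate_eq_map_pyRange w [], List.foldl_map]
  rfl

-- port A as a fold of pvStepA over the flattened cells
lemma pv_A_eq_cells (w : List (List Int)) :
    define_window_key_points w = ((pvCells w).foldl pvStepA PySem.Dict.empty).items := by
  unfold define_window_key_points pvCells
  rw [pv_pyRange_fold_rows w (fun d y row =>
        (PySem.List.pyRange 0 row.length 1).foldl (fun d x =>
          let value := PySem.List.pyGetD row x 0
          if d.contains value = false then
            d.insert value [(y, x), (y + 1, x + 1)]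
          else
            d.modify value [] (fun l => PySem.List.pySetD l 1 (y + 1, x + 1))) d)]
  rw [show (fun (d : PySem.Dict Int (List (Int × Int))) (p : Int × List Int) =>
        (PySem.List.pyRange 0 p.2.length 1).foldl (fun d x =>
          let value := PySem.List.pyGetD p.2 x 0
          if d.contains value = false then
            d.insert value [(p.1, x), (p.1 + 1, x + 1)]
          else
            d.modify value [] (fun l => PySem.List.pySetD l 1 (p.1 + 1, x + 1))) d)
      = (fun d p => (PySem.List.enumerate p.2 0).foldl (fun d xv => pvStepA d (p.1, xv.1, xv.2)) d)
      from funext fun d => funext fun p => pv_pyRange_fold p.2 (fun d x v =>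
        if d.contains v = false then d.insert v [(p.1, x), (p.1 + 1, x + 1)]
        else d.modify v [] (fun l => PySem.List.pySetD l 1 (p.1 + 1, x + 1))) d]
  rw [pv_nested_eq_cells]

-- port B as the zip of the two write-once dicts over the flattened cells
lemma pv_B_eq_cells (w : List (List Int)) :
    define_window_key_points_alt w
      = (pvFirst (pvCells w)).items.map (fun p =>
          (p.1, [p.2, (pvLast (pvCells w)).getD p.1 (0, 0)])) := rfl

-- lookup in an insert-if-absent fold: first occurrence wins
lemma pv_get?_foldIns (val : Int × Int × Int → Int × Int) (l : List (Int × Int × Int))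
    (d : PySem.Dict Int (Int × Int)) (v : Int) :
    (l.foldl (pvStepIns val) d).get? v
      = (d.get? v).or ((l.find? (fun c => c.2.2 == v)).map val) := by
  induction l generalizing d with
  | nil => simp
  | cons c tl ih =>
      rw [List.foldl_cons, List.find?_cons]
      cases hc : d.contains c.2.2 with
      | true =>
          have hh : pvStepIns val d c = d := by simp [pvStepIns, hc]
          rw [hh, ih d]
          by_cases hv : c.2.2 = v
          · subst hv
            have hs : (d.get? c.2.2).isSome := by
              rw [← PySem.Dict.contains_eq_isSome_get?, hc]
            obtain ⟨a, ha⟩ := Option.isSome_iff_exists.mp hs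
            simp [ha]
          · have hbe : (c.2.2 == v) = false := by simp [hv]
            simp only [hbe]
      | false =>
          have hh : pvStepIns val d c = d.insert c.2.2 (val c) := by simp [pvStepIns, hc]
          rw [hh, ih _]
          by_cases hv : c.2.2 = v
          · subst hv
            have hnone : d.get? c.2.2 = none := by
              cases h : d.get? c.2.2 with
              | none => rfl
              | some a =>
                  have h2 := PySem.Dict.contains_eq_isSome_get? d c.2.2
                  rw [hc, h] at h2
                  simp at h2
            rw [PySem.Dict.get?_insert_self, hnone]
            simp
          · have hbe : (c.2.2 == v) = false := by simp [hv]
            simp only [hbe]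
            rw [PySem.Dict.get?_insert_of_ne d _ (Ne.symm hv)]

lemma pv_nodup_keys_foldIns (val : Int × Int × Int → Int × Int) (l : List (Int × Int × Int))
    (d : PySem.Dict Int (Int × Int)) (h : d.keys.Nodup) :
    (l.foldl (pvStepIns val) d).keys.Nodup := by
  induction l generalizing d with
  | nil => exact h
  | cons c tl ih =>
      simp only [List.foldl_cons, pvStepIns]
      split
      · exact ih d h
      · exact ih _ (PySem.Dict.nodup_keys_insert _ _ _ h)

lemma pvFirst_nodup (l : List (Int × Int × Int)) : (pvFirst l).keys.Nodup :=
  pv_nodup_keys_foldIns _ _ _ PySem.Dict.nodup_keys_empty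

lemma pvFirst_append (l : List (Int × Int × Int)) (y x v : Int) :
    pvFirst (l ++ [(y, x, v)])
      = if (pvFirst l).contains v then pvFirst l else (pvFirst l).insert v (y, x) := by
  unfold pvFirst
  rw [List.foldl_append, List.foldl_cons, List.foldl_nil]
  rfl

lemma pvLast_cons_eq (l : List (Int × Int × Int)) (y x v : Int) :
    pvLast (l ++ [(y, x, v)])
      = l.reverse.foldl (pvStepIns pvBump) (PySem.Dict.empty.insert v (y + 1, x + 1)) := by
  unfold pvLast
  rw [show (l ++ [(y, x, v)]).reverse = (y, x, v) :: l.reverse from by simp, List.foldl_cons]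
  have h : pvStepIns pvBump PySem.Dict.empty (y, x, v)
      = PySem.Dict.empty.insert v (y + 1, x + 1) := by
    simp [pvStepIns, pvBump, PySem.Dict.contains_empty]
  rw [h]

lemma pvLast_append_self (l : List (Int × Int × Int)) (y x v : Int) :
    (pvLast (l ++ [(y, x, v)])).getD v (0, 0) = (y + 1, x + 1) := by
  rw [pvLast_cons_eq, PySem.Dict.getD_eq_get?_getD, pv_get?_foldIns,
    PySem.Dict.get?_insert_self, Option.some_or]
  rfl

lemma pvLast_append_ne (l : List (Int × Int × Int)) (y x v w : Int) (hw : w ≠ v) :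
    (pvLast (l ++ [(y, x, v)])).getD w (0, 0) = (pvLast l).getD w (0, 0) := by
  rw [pvLast_cons_eq, PySem.Dict.getD_eq_get?_getD, PySem.Dict.getD_eq_get?_getD]
  unfold pvLast
  rw [pv_get?_foldIns, pv_get?_foldIns, PySem.Dict.get?_insert_of_ne _ _ hw]

-- the main correspondence, by induction from the right over the cell list
lemma pv_main (l : List (Int × Int × Int)) :
    (l.foldl pvStepA PySem.Dict.empty).items
      = (pvFirst l).items.map (fun p => (p.1, [p.2, (pvLast l).getD p.1 (0, 0)])) := by
  induction l using List.reverseRecOn with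
  | nil => rfl
  | append_singleton l' c ih =>
      obtain ⟨y, x, v⟩ := c
      have hFnd : (pvFirst l').keys.Nodup := pvFirst_nodup l'
      have hkeys : (l'.foldl pvStepA PySem.Dict.empty).keys = (pvFirst l').keys := by
        simp only [PySem.Dict.keys, ih, List.map_map]
        rfl
      have hAnd : (l'.foldl pvStepA PySem.Dict.empty).keys.Nodup := hkeys ▸ hFnd
      have hcont : (l'.foldl pvStepA PySem.Dict.empty).contains v = (pvFirst l').contains v := by
        rw [PySem.Dict.contains_eq_decide_mem_keys, PySem.Dict.contains_eq_decide_mem_keys, hkeys]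
      rw [List.foldl_append, List.foldl_cons, List.foldl_nil, pvFirst_append]
      cases hc : (pvFirst l').contains v with
      | false =>
          -- new window id: A appends a fresh pair; first appends; last sees only this cell
          rw [if_neg (by simp)]
          have hstep : pvStepA (l'.foldl pvStepA PySem.Dict.empty) (y, x, v)
              = (l'.foldl pvStepA PySem.Dict.empty).insert v [(y, x), (y + 1, x + 1)] := by
            simp [pvStepA, hcont, hc]
          rw [hstep, PySem.Dict.items_insert_of_not_contains _ _ (hcont.trans hc), ih,
            PySem.Dict.items_insert_of_not_contains _ _ hc, List.map_append]
          have hne : ∀ p ∈ (pvFirst l').items,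
              (p.1, [p.2, (pvLast (l' ++ [(y, x, v)])).getD p.1 (0, 0)])
                = (p.1, [p.2, (pvLast l').getD p.1 (0, 0)]) := by
            intro p hp
            have hpv : p.1 ≠ v := by
              intro h
              have hk := PySem.Dict.mem_keys_of_mem_items _ hp
              rw [h] at hk
              rw [PySem.Dict.contains_eq_decide_mem_keys] at hc
              simp at hc
              exact hc hk
            rw [pvLast_append_ne l' y x v p.1 hpv]
          rw [List.map_congr_left hne]
          congr 1
          simp only [List.map_cons, List.map_nil]
          rw [pvLast_append_self l' y x v]
      | true =>
          -- existing id: A patches index 1 of the pair; first unchanged; last sees this cell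
          rw [if_pos rfl]
          obtain ⟨p0, hp0⟩ : ∃ p0, (pvFirst l').get? v = some p0 := by
            have h := PySem.Dict.contains_eq_isSome_get? (pvFirst l') v
            rw [hc] at h
            exact Option.isSome_iff_exists.mp h.symm
          have hmemF : (v, p0) ∈ (pvFirst l').items :=
            PySem.Dict.mem_items_of_get?_eq_some _ hp0
          have hmemA : (v, [p0, (pvLast l').getD v (0, 0)])
              ∈ (l'.foldl pvStepA PySem.Dict.empty).items := by
            rw [ih]
            exact List.mem_map.2 ⟨(v, p0), hmemF, rfl⟩
          have hgdA : (l'.foldl pvStepA PySem.Dict.empty).getD v []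
              = [p0, (pvLast l').getD v (0, 0)] :=
            PySem.Dict.getD_of_mem_items _ hmemA hAnd []
          have hcA : (l'.foldl pvStepA PySem.Dict.empty).contains v = true := hcont.trans hc
          have hstep : pvStepA (l'.foldl pvStepA PySem.Dict.empty) (y, x, v)
              = (l'.foldl pvStepA PySem.Dict.empty).insert v [p0, (y + 1, x + 1)] := by
            have h1 : pvStepA (l'.foldl pvStepA PySem.Dict.empty) (y, x, v)
                = (l'.foldl pvStepA PySem.Dict.empty).insert v
                    (PySem.List.pySetD ((l'.foldl pvStepA PySem.Dict.empty).getD v []) 1 (y + 1, x + 1)) := by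
              simp [pvStepA, hcA, PySem.Dict.modify]
            rw [h1, hgdA]
            simp [PySem.List.pySetD, PySem.List.pySet?, PySem.List.pyIdx?]
          rw [hstep, PySem.Dict.items_insert_of_contains _ _ hcA, ih, List.map_map]
          refine List.map_congr_left ?_
          intro p hp
          obtain ⟨a, b⟩ := p
          simp only [Function.comp_apply]
          by_cases hpv : a = v
          · subst hpv
            have h2 := PySem.Dict.get?_of_mem_items _ hp hFnd
            rw [hp0] at h2
            have hb : b = p0 := by
              injection h2 with h3
              exact h3.symm
            subst hb
            simp only [beq_self_eq_true, if_pos]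
            rw [pvLast_append_self l' y x a]
          · have hbe : (a == v) = false := by simp [hpv]
            simp only [hbe, Bool.false_eq_true, if_false]
            rw [pvLast_append_ne l' y x v a hpv]

-- ===== VERDICT (by name: the statement is the Claim_ definition above) =====
theorem define_window_key_points_spec : Claim_equal_define_window_key_points := by
  intro w _
  unfold Spec_define_window_key_points
  rw [pv_A_eq_cells, pv_B_eq_cells]
  exact pv_main (pvCells w)
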